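-- pv_equiv track=rewrite | github.com/kierachell/practice | python/cracking/hard.py | size_subarray
-- ===== SOURCE A (Python) =====
-- def size_subarray(arr, subarray):
--     collected = []
--     size = 0
--     for num in arr:
--         size += 1
--         if num in subarray:
--             collected.append(num)
--         if sorted(collected) == sorted(subarray):
--             break
--     return size
-- ===== SOURCE B (Python) =====
-- def size_subarray(arr, subarray):
--     need = {}
--     for v in subarray:
--         need[v] = need.get(v, 0) + 1
--     missing = len(subarray)
--     over = False
--     size = 0
--     for num in arr:
--         size += 1
--         if num in need:
--             cnt = need[num]
--             need[num] = cnt - 1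
--             if cnt > 0:
--                 missing -= 1
--             else:
--                 over = True
--         if missing == 0 and not over:
--             break
--     return size
-- ===== Notes on version B (the rewrite author's own statement) =====
-- stated objective: faster
-- what changed: Replaces the per-element sort-and-compare (sorting both collected and subarray at every step) with a count dictionary built once from subarray plus a running 'missing' counter and an overshoot flag, so each step does O(1) work instead of re-sorting.
import Mathlib
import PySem

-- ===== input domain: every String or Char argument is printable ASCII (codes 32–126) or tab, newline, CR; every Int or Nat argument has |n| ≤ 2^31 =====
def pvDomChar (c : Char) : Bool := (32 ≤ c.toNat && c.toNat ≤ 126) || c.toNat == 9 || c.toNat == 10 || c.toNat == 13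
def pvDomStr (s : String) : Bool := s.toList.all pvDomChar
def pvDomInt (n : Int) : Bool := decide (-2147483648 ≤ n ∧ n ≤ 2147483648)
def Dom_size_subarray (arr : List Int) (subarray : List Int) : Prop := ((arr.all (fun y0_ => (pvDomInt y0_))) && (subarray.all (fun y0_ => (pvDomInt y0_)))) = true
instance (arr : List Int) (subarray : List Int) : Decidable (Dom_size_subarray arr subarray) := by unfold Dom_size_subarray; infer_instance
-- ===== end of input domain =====

-- B replaces A's per-element sort-and-compare with a count dictionary, a running
-- 'missing' counter and an overshoot flag (asymptotically faster).


-- ===== PORT A =====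
-- the loop: collected accumulates elements of arr found in subarray; break when sorted(collected) == sorted(subarray)
def sizeA_go (subarray : List Int) : List Int → List Int → Int → Int
  | [], _, size => size
  | num :: rest, collected, size =>
    let size' := size + 1
    let collected' := if num ∈ subarray then collected ++ [num] else collected
    if PySem.List.sorted collected' (fun x => x) false =
        PySem.List.sorted subarray (fun x => x) false
    then size'
    else sizeA_go subarray rest collected' size'

def size_subarray (arr : List Int) (subarray : List Int) : Int :=
  sizeA_go subarray arr [] 0

-- ===== PORT B =====
-- the loop: need[v] = still-needed copies of v; missing = total still needed; over = some element over-collected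
def sizeB_go : List Int → PySem.Dict Int Int → Int → Bool → Int → Int
  | [], _, _, _, size => size
  | num :: rest, need, missing, ov, size =>
    let size' := size + 1
    let st :=
      if need.contains num then
        let cnt := need.getD num 0
        (need.insert num (cnt - 1),
         if cnt > 0 then missing - 1 else missing,
         if cnt > 0 then ov else true)
      else (need, missing, ov)
    if st.2.1 = 0 ∧ st.2.2 = false then size'
    else sizeB_go rest st.1 st.2.1 st.2.2 size'

def size_subarray_alt (arr : List Int) (subarray : List Int) : Int :=
  sizeB_go arr
    (subarray.foldl (fun d v => d.insert v (d.getD v 0 + 1)) PySem.Dict.empty)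
    (subarray.length : Int) false 0

-- ===== PRECONDITION & SPEC =====
def Spec_size_subarray (arr : List Int) (subarray : List Int) (out : Int) : Prop := out = size_subarray_alt arr subarray
instance (arr : List Int) (subarray : List Int) (out : Int) : Decidable (Spec_size_subarray arr subarray out) := by unfold Spec_size_subarray; infer_instance

-- ===== CLAIM (what is proved, stated in full; the proofs are below) =====
def Claim_equal_size_subarray : Prop := ∀ (arr : List Int) (subarray : List Int), Dom_size_subarray arr subarray → Spec_size_subarray arr subarray (size_subarray arr subarray)

-- ===== LEMMAS AND PROOFS =====

-- A list of nonnegative integers with zero sum is all zero.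
lemma sum_eq_zero_all (l : List Int) (hnn : ∀ x ∈ l, 0 ≤ x) (hs : l.sum = 0) :
    ∀ x ∈ l, x = 0 := by
  induction l with
  | nil => simp
  | cons a t ih =>
    have ha : 0 ≤ a := hnn a (by simp)
    have ht : 0 ≤ t.sum := List.sum_nonneg (fun x hx => hnn x (by simp [hx]))
    have hs' : a + t.sum = 0 := by simpa using hs
    intro x hx
    rw [List.mem_cons] at hx
    rcases hx with rfl | hx
    · omega
    · exact ih (fun y hy => hnn y (by simp [hy])) (by omega) x hx

-- changing one term of a sum over a nodup list
lemma sum_map_update (l : List Int) (f g : Int → Int) (num : Int)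
    (hnd : l.Nodup) (hm : num ∈ l)
    (hne : ∀ v ∈ l, v ≠ num → g v = f v) :
    (l.map g).sum = (l.map f).sum + (g num - f num) := by
  induction l with
  | nil => simp at hm
  | cons a t ih =>
    rw [List.mem_cons] at hm
    rcases hm with rfl | hm
    · have hgt : ∀ v ∈ t, g v = f v := by
        intro v hv
        exact hne v (by simp [hv]) (by rintro rfl; exact (List.nodup_cons.mp hnd).1 hv)
      simp only [List.map_cons, List.sum_cons]
      rw [List.map_congr_left hgt]; ring
    · have hna : a ≠ num := by rintro rfl; exact (List.nodup_cons.mp hnd).1 hm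
      have := ih (List.nodup_cons.mp hnd).2 hm (fun v hv => hne v (by simp [hv]))
      simp only [List.map_cons, List.sum_cons, this, hne a (by simp) hna]
      ring

-- the break test: sorted(collected) == sorted(subarray) iff missing = 0 and not over
lemma break_equiv (sub coll : List Int) (hsub : ∀ x ∈ coll, x ∈ sub) :
    coll.Perm sub ↔
      (((PySem.List.dedup sub).map
          (fun v => max 0 ((sub.count v : Int) - (coll.count v : Int)))).sum = 0
        ∧ ∀ v ∈ sub, coll.count v ≤ sub.count v) := by
  constructor
  · intro hp
    have hc : ∀ v, coll.count v = sub.count v := hp.count_eq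
    constructor
    · apply List.sum_eq_zero
      intro x hx
      simp only [List.mem_map] at hx
      obtain ⟨v, _, rfl⟩ := hx
      simp [hc v]
    · intro v _; exact (hc v).le
  · rintro ⟨hz, hle⟩
    rw [List.perm_iff_count]
    intro v
    by_cases hv : v ∈ sub
    · have hvd : v ∈ PySem.List.dedup sub := by
        rw [PySem.List.dedup_eq_ofList, PySem.Set.mem_ofList]; exact hv
      have hnn : ∀ x ∈ (PySem.List.dedup sub).map
          (fun v => max 0 ((sub.count v : Int) - (coll.count v : Int))), 0 ≤ x := by
        intro x hx
        simp only [List.mem_map] at hx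
        obtain ⟨w, _, rfl⟩ := hx
        exact le_max_left _ _
      have h0 : max 0 ((sub.count v : Int) - (coll.count v : Int)) = 0 :=
        sum_eq_zero_all _ hnn hz _ (List.mem_map.mpr ⟨v, hvd, rfl⟩)
      have := hle v hv
      omega
    · have h1 : coll.count v = 0 := by
        rw [List.count_eq_zero]; intro hc; exact hv (hsub v hc)
      have h2 : sub.count v = 0 := by rw [List.count_eq_zero]; exact hv
      omega

-- the loop invariant: A's loop state (collected) and B's (need, missing, ov) agree
lemma go_eq (subarray : List Int) (rest collected : List Int)
    (need : PySem.Dict Int Int) (missing : Int) (ov : Bool) (size : Int)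
    (hsub : ∀ x ∈ collected, x ∈ subarray)
    (hc : ∀ v, need.contains v = decide (v ∈ subarray))
    (hg : ∀ v ∈ subarray, need.getD v 0 = (subarray.count v : Int) - (collected.count v : Int))
    (hover : (ov = false) ↔ ∀ v ∈ subarray, collected.count v ≤ subarray.count v)
    (hmiss : missing = ((PySem.List.dedup subarray).map
        (fun v => max 0 ((subarray.count v : Int) - (collected.count v : Int)))).sum) :
    sizeA_go subarray rest collected size = sizeB_go rest need missing ov size := by
  induction rest generalizing collected need missing ov size with
  | nil => simp [sizeA_go, sizeB_go]
  | cons num rest ih =>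
    simp only [sizeA_go, sizeB_go]
    by_cases hmem : num ∈ subarray
    · have hcontains : need.contains num = true := by rw [hc]; simp [hmem]
      have hcnt : need.getD num 0 = (subarray.count num : Int) - (collected.count num : Int) :=
        hg num hmem
      have hsub' : ∀ x ∈ collected ++ [num], x ∈ subarray := by
        intro x hx
        rcases List.mem_append.mp hx with h | h
        · exact hsub x h
        · simp at h; subst h; exact hmem
      have hcount' : ∀ v : Int,
          ((collected ++ [num]).count v : Int)
            = (collected.count v : Int) + (if v = num then 1 else 0) := by
        intro v
        by_cases hv : v = num
        · simp [List.count_append, hv]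
        · have hv' : ¬ num = v := fun h => hv h.symm
          simp [List.count_append, hv, hv']
      have hnd : (PySem.List.dedup subarray).Nodup := by
        rw [PySem.List.dedup_eq_ofList]; exact PySem.Set.nodup_ofList subarray
      have hmemd : num ∈ PySem.List.dedup subarray := by
        rw [PySem.List.dedup_eq_ofList, PySem.Set.mem_ofList]; exact hmem
      have hg' : ∀ v ∈ subarray,
          (need.insert num (need.getD num 0 - 1)).getD v 0
            = (subarray.count v : Int) - (((collected ++ [num]).count v : Int)) := by
        intro v hv
        rw [PySem.Dict.getD_insert, hcount' v]
        by_cases hvn : v = num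
        · rw [if_pos hvn, hvn, hcnt]; simp; omega
        · rw [if_neg hvn]; simp [hvn, hg v hv]
      have hc' : ∀ v, (need.insert num (need.getD num 0 - 1)).contains v
          = decide (v ∈ subarray) := by
        intro v
        rw [PySem.Dict.contains_insert, hc]
        by_cases hvn : v = num
        · simp [hvn, hmem]
        · simp [hvn]
      simp only [hmem, if_true, hcontains]
      by_cases hpos : need.getD num 0 > 0
      · -- still needed: missing decreases, over unchanged
        simp only [hpos, if_true]
        have hlt : (collected.count num : Int) < (subarray.count num : Int) := by omega
        have hover' : (ov = false) ↔
            ∀ v ∈ subarray, (collected ++ [num]).count v ≤ subarray.count v := by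
          rw [hover]
          constructor
          · intro h v hv
            have h2 := hcount' v
            have h3 := h v hv
            by_cases hvn : v = num
            · subst hvn; simp only [if_pos] at h2; omega
            · rw [if_neg hvn] at h2; omega
          · intro h v hv
            have h2 := hcount' v
            have h3 := h v hv
            by_cases hvn : v = num
            · subst hvn; simp only [if_pos] at h2; omega
            · rw [if_neg hvn] at h2; omega
        have hmiss' : missing - 1
            = ((PySem.List.dedup subarray).map
                (fun v => max 0 ((subarray.count v : Int) - (((collected ++ [num]).count v : Int))))).sum := by
          rw [sum_map_update (PySem.List.dedup subarray)
              (fun v => max 0 ((subarray.count v : Int) - (collected.count v : Int)))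
              (fun v => max 0 ((subarray.count v : Int) - (((collected ++ [num]).count v : Int))))
              num hnd hmemd]
          · have h1 : (((collected ++ [num]).count num : Int)) = (collected.count num : Int) + 1 := by
              rw [hcount' num]; simp
            have e1 : max 0 ((subarray.count num : Int) - (collected.count num : Int))
                = (subarray.count num : Int) - (collected.count num : Int) := by omega
            have e2 : max 0 ((subarray.count num : Int) - ((collected.count num : Int) + 1))
                = (subarray.count num : Int) - (collected.count num : Int) - 1 := by omega
            simp only [h1, hmiss, e1, e2]
            ring
          · intro v hv hvn
            rw [hcount' v]; simp [hvn]
        have hbreq : ((collected ++ [num]).Perm subarray) ↔ (missing - 1 = 0 ∧ ov = false) := by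
          rw [break_equiv subarray (collected ++ [num]) hsub', ← hover', hmiss']
        have hiff : ((PySem.List.sorted (collected ++ [num]) (fun x => x) false)
              = PySem.List.sorted subarray (fun x => x) false)
            ↔ (missing - 1 = 0 ∧ ov = false) := by
          rw [PySem.List.sorted_id_eq_sorted_id_iff_perm]; exact hbreq
        by_cases hbr : missing - 1 = 0 ∧ ov = false
        · rw [if_pos hbr, if_pos (hiff.mpr hbr)]
        · rw [if_neg hbr, if_neg (fun h => hbr (hiff.mp h))]
          exact ih (collected ++ [num]) _ _ _ _ hsub' hc' hg' hover' hmiss'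
      · -- over-collected: over becomes true
        simp only [hpos, if_false]
        have hge : (subarray.count num : Int) ≤ (collected.count num : Int) := by omega
        have hover' : ((true : Bool) = false) ↔
            ∀ v ∈ subarray, (collected ++ [num]).count v ≤ subarray.count v := by
          constructor
          · intro h; exact absurd h (by simp)
          · intro h
            have h3 := h num hmem
            have h1 : (((collected ++ [num]).count num : Int)) = (collected.count num : Int) + 1 := by
              rw [hcount' num]; simp
            omega
        have hmiss' : missing
            = ((PySem.List.dedup subarray).map
                (fun v => max 0 ((subarray.count v : Int) - (((collected ++ [num]).count v : Int))))).sum := by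
          rw [hmiss]
          apply congrArg
          apply List.map_congr_left
          intro v hv
          rw [hcount' v]
          by_cases hvn : v = num
          · rw [if_pos hvn, hvn, max_eq_left (by omega), max_eq_left (by omega)]
          · rw [if_neg hvn]; simp
        have hbreq : ((collected ++ [num]).Perm subarray)
            ↔ (missing = 0 ∧ (true : Bool) = false) := by
          rw [break_equiv subarray (collected ++ [num]) hsub', ← hover', hmiss']
        have hiff : ((PySem.List.sorted (collected ++ [num]) (fun x => x) false)
              = PySem.List.sorted subarray (fun x => x) false)
            ↔ (missing = 0 ∧ (true : Bool) = false) := by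
          rw [PySem.List.sorted_id_eq_sorted_id_iff_perm]; exact hbreq
        have hbr : ¬ (missing = 0 ∧ (true : Bool) = false) := by simp
        rw [if_neg hbr, if_neg (fun h => hbr (hiff.mp h))]
        exact ih (collected ++ [num]) _ _ _ _ hsub' hc' hg' hover' hmiss'
    · -- num not in subarray: nothing changes
      have hcontains : need.contains num = false := by rw [hc]; simp [hmem]
      simp only [hmem, hcontains, Bool.false_eq_true, if_false]
      have hbreq : (collected.Perm subarray) ↔ (missing = 0 ∧ ov = false) := by
        rw [break_equiv subarray collected hsub, ← hover, hmiss]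
      have hiff : ((PySem.List.sorted collected (fun x => x) false)
            = PySem.List.sorted subarray (fun x => x) false)
          ↔ (missing = 0 ∧ ov = false) := by
        rw [PySem.List.sorted_id_eq_sorted_id_iff_perm]; exact hbreq
      by_cases hbr : missing = 0 ∧ ov = false
      · rw [if_pos hbr, if_pos (hiff.mpr hbr)]
      · rw [if_neg hbr, if_neg (fun h => hbr (hiff.mp h))]
        exact ih collected _ _ _ _ hsub hc hg hover hmiss

-- ===== VERDICT (by name: the statement is the Claim_ definition above) =====
theorem size_subarray_spec : Claim_equal_size_subarray := by
  intro arr subarray _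
  unfold Spec_size_subarray size_subarray size_subarray_alt
  rw [PySem.Dict.foldl_insert_getD_add_one_eq_counter]
  apply go_eq
  · simp
  · intro v; rw [PySem.Dict.contains_counter]; simp
  · intro v _; simp [PySem.Dict.getD_counter]
  · simp
  · have hp : (PySem.List.dedup subarray).Perm subarray.dedup := by
      rw [List.perm_ext_iff_of_nodup]
      · intro a
        rw [PySem.List.dedup_eq_ofList, PySem.Set.mem_ofList, List.mem_dedup]
      · rw [PySem.List.dedup_eq_ofList]; exact PySem.Set.nodup_ofList subarray
      · exact subarray.nodup_dedup
    simp only [List.count_nil, Nat.cast_zero, sub_zero]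
    have hmax : ∀ v : Int, max 0 ((subarray.count v : Int)) = (subarray.count v : Int) := by
      intro v; exact max_eq_right (by positivity)
    rw [List.map_congr_left (fun v _ => hmax v)]
    rw [(hp.map _).sum_eq, ← List.sum_map_count_dedup_eq_length subarray]
    induction subarray.dedup with
    | nil => simp
    | cons a t ih => simp [ih]
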